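-- pv_equiv track=rewrite | github.com/Git-Math/rubik | src/rubik3000/print_cube.py | solution_to_string
-- ===== SOURCE A (Python) =====
-- def solution_to_string(solution, solution_i):
--     solution_string = ""
--     if solution_i == 0:
--         solution_string += "[start]"
--     else:
--         solution_string += "start"
--     for i, move in enumerate(solution):
--         if i + 1 == solution_i:
--             solution_string += " [" + move + "]"
--         else:
--             solution_string += " " + move
--     return solution_string
-- ===== SOURCE B (Python) =====
-- def solution_to_string(solution, solution_i):
--     tokens = ["start"] + list(solution)
--     if 0 <= solution_i < len(tokens):
--         tokens[solution_i] = "[" + tokens[solution_i] + "]"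
--     return " ".join(tokens)
-- ===== Notes on version B (the rewrite author's own statement) =====
-- stated objective: simpler
-- what changed: Replaces the per-element bracket test inside an accumulating string-concatenation loop by building the full token list, mutating the single bracketed token by index (with a range guard), and joining once.
import Mathlib
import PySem

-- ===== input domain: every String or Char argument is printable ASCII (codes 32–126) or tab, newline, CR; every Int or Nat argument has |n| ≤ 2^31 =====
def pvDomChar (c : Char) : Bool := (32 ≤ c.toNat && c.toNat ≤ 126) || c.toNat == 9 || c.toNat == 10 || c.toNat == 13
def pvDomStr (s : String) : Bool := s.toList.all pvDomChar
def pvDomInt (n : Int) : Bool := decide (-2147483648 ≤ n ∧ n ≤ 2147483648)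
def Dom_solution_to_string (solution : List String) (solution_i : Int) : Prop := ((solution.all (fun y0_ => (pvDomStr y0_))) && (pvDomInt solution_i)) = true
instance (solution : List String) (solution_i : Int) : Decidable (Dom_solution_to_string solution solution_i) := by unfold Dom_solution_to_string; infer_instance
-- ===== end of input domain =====

-- B builds the full token list, brackets the one indexed token under a range guard, and joins once.

-- ===== PORT A =====
def solution_to_string (solution : List String) (solution_i : Int) : String :=
  let solution_string : String := ""
  let solution_string := if solution_i = 0 then solution_string ++ "[start]" else solution_string ++ "start"
  (PySem.List.enumerate solution).foldl
    (fun acc p => if p.1 + 1 = solution_i then acc ++ " [" ++ p.2 ++ "]" else acc ++ " " ++ p.2)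
    solution_string

-- ===== PORT B =====
def solution_to_string_alt (solution : List String) (solution_i : Int) : String :=
  let tokens := "start" :: solution
  let tokens :=
    if 0 ≤ solution_i ∧ solution_i < (tokens.length : Int) then
      PySem.List.pySetD tokens solution_i ("[" ++ PySem.List.pyGetD tokens solution_i "" ++ "]")
    else tokens
  PySem.Str.join " " tokens

-- ===== PRECONDITION & SPEC =====
def Spec_solution_to_string (solution : List String) (solution_i : Int) (out : String) : Prop := out = solution_to_string_alt solution solution_i
instance (solution : List String) (solution_i : Int) (out : String) : Decidable (Spec_solution_to_string solution solution_i out) := by unfold Spec_solution_to_string; infer_instance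

-- ===== CLAIM (what is proved, stated in full; the proofs are below) =====
def Claim_equal_solution_to_string : Prop := ∀ (solution : List String) (solution_i : Int), Dom_solution_to_string solution solution_i → Spec_solution_to_string solution solution_i (solution_to_string solution solution_i)

-- ===== LEMMAS AND PROOFS =====

-- String-level foldl with appended pieces becomes a char-list foldl.
theorem toList_foldl_append {α : Type} (l : List α) (g : α → String) (s : String) :
    (l.foldl (fun a p => a ++ g p) s).toList = l.foldl (fun a p => a ++ (g p).toList) s.toList := by
  induction l generalizing s with
  | nil => rfl
  | cons x xs ih => simp [List.foldl_cons, ih]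

-- join with a separator, from the head: the tail contributes sep ++ piece each.
theorem chars_join_cons (sep : List Char) (t : List Char) (ts : List (List Char)) :
    PySem.Chars.join sep (t :: ts) = t ++ ts.flatMap (fun m => sep ++ m) := by
  induction ts generalizing t with
  | nil => simp [PySem.Chars.join_singleton]
  | cons m rest ih => simp [PySem.Chars.join_cons_cons, ih]

-- flatMap over an enumeration whose function only reads the element.
theorem flatMap_enumerate {α β : Type} (xs : List α) (s : Int) (f : α → List β) :
    (PySem.List.enumerate xs s).flatMap (fun p => f p.2) = xs.flatMap f := by
  induction xs generalizing s with
  | nil => simp [PySem.List.enumerate_nil]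
  | cons x xs ih => simp [PySem.List.enumerate_cons, ih]

-- A's loop, as a flatMap of per-move pieces on the char-list side.
theorem loopA_eq (solution : List String) (k : Int) (s : String) :
    ((PySem.List.enumerate solution).foldl
      (fun acc p => if p.1 + 1 = k then acc ++ " [" ++ p.2 ++ "]" else acc ++ " " ++ p.2) s).toList
    = s.toList ++ (PySem.List.enumerate solution).flatMap
        (fun p => if p.1 + 1 = k then ' ' :: '[' :: p.2.toList ++ [']'] else ' ' :: p.2.toList) := by
  have h1 : (PySem.List.enumerate solution).foldl
      (fun acc p => if p.1 + 1 = k then acc ++ " [" ++ p.2 ++ "]" else acc ++ " " ++ p.2) s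
      = (PySem.List.enumerate solution).foldl
      (fun acc p => acc ++ (if p.1 + 1 = k then " [" ++ p.2 ++ "]" else " " ++ p.2)) s := by
    apply PySem.List.foldl_congr_mem
    intro acc p _
    by_cases h : p.1 + 1 = k <;> simp [h, String.append_assoc]
  rw [h1, toList_foldl_append]
  rw [PySem.List.foldl_append_eq_flatMap]
  congr 1
  apply List.flatMap_congr
  intro p _
  by_cases h : p.1 + 1 = k <;> simp [h]

theorem no_bracket (solution : List String) (k : Int)
    (hk : k ≤ 0 ∨ (solution.length : Int) < k) :
    (PySem.List.enumerate solution).flatMap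
        (fun p => if p.1 + 1 = k then ' ' :: '[' :: p.2.toList ++ [']'] else ' ' :: p.2.toList)
    = solution.flatMap (fun m => ' ' :: m.toList) := by
  rw [← flatMap_enumerate solution 0 (fun m => ' ' :: m.toList)]
  apply List.flatMap_congr
  intro p hp
  rcases (PySem.List.mem_enumerate_iff _ _ _).mp hp with ⟨j, hj, rfl⟩
  have hjk : ¬((j : Int) + 1 = k) := by omega
  simp [hjk]

-- the no-bracket tail: indices in [s, s+len) all miss k
theorem no_bracket_from (solution : List String) (k s : Int)
    (hk : ∀ j : Nat, j < solution.length → s + (j : Int) + 1 ≠ k) :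
    (PySem.List.enumerate solution s).flatMap
        (fun p => if p.1 + 1 = k then ' ' :: '[' :: p.2.toList ++ [']'] else ' ' :: p.2.toList)
    = solution.flatMap (fun m => ' ' :: m.toList) := by
  rw [← flatMap_enumerate solution s (fun m => ' ' :: m.toList)]
  apply List.flatMap_congr
  intro p hp
  rcases (PySem.List.mem_enumerate_iff _ _ _).mp hp with ⟨j, hj, rfl⟩
  have := hk j hj
  simp only [ite_eq_right_iff]
  intro h; exact absurd h this

theorem key (solution : List String) (k : Int) :
    solution_to_string solution k = solution_to_string_alt solution k := by
  rw [← String.toList_inj]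
  unfold solution_to_string solution_to_string_alt
  simp only []
  rw [loopA_eq]
  by_cases h0 : k = 0
  · subst h0
    have hc : (0 : Int) ≤ 0 ∧ (0 : Int) < (("start" :: solution).length : Int) := by
      refine ⟨le_refl 0, ?_⟩
      simp only [List.length_cons]
      push_cast
      omega
    rw [if_pos hc, if_pos rfl]
    rw [no_bracket solution 0 (Or.inl le_rfl)]
    rw [PySem.List.pySetD_of_nonneg _ _ le_rfl]
    simp only [Int.toNat_zero, List.set_cons_zero, PySem.List.pyGetD_zero_cons]
    rw [PySem.Str.toList_join, List.map_cons, chars_join_cons, List.flatMap_map]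
    simp
  · by_cases hr : 0 ≤ k ∧ k < (("start" :: solution).length : Int)
    · -- bracket at position k-1 of solution
      obtain ⟨hk0, hklt⟩ := hr
      have hlen : k < (solution.length : Int) + 1 := by
        simpa using hklt
      set n : Nat := k.toNat - 1 with hn_def
      have hkn : k = (n : Int) + 1 := by omega
      have hn : n < solution.length := by omega
      rw [if_neg h0, if_pos ⟨hk0, hklt⟩]
      rw [PySem.List.pySetD_of_nonneg _ _ hk0]
      have htn : k.toNat = n + 1 := by omega
      rw [htn]
      have hget : PySem.List.pyGetD ("start" :: solution) k "" = solution[n] := by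
        rw [hkn, show ((n : Int) + 1) = ((n + 1 : Nat) : Int) by push_cast; ring,
            PySem.List.pyGetD_natCast]
        simp [List.getD, List.getElem?_eq_getElem hn]
      rw [hget]
      have hsol : solution = solution.take n ++ solution[n] :: solution.drop (n + 1) := by
        conv_lhs => rw [← List.take_append_drop n solution]
        rw [List.drop_eq_getElem_cons hn]
      conv_lhs => rw [hsol]
      rw [PySem.List.enumerate_append, List.flatMap_append, PySem.List.enumerate_cons,
          List.flatMap_cons]
      have hlt : (solution.take n).length = n := by
        simp [Nat.min_eq_left (Nat.le_of_lt hn)]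
      rw [no_bracket_from (solution.take n) k 0 (by intro j hj; rw [hlt] at hj; omega)]
      rw [hlt]
      rw [if_pos (by omega : (0 : Int) + (n : Int) + 1 = k)]
      rw [no_bracket_from (solution.drop (n + 1)) k ((0 : Int) + (n : Int) + 1)
            (by intro j hj; omega)]
      rw [List.set_cons_succ, List.set_eq_take_append_cons_drop, if_pos hn]
      rw [PySem.Str.toList_join, List.map_cons, chars_join_cons]
      simp [← List.map_take, ← List.map_drop, List.flatMap_map, List.flatMap_append]
    · -- no bracket anywhere
      rw [if_neg h0, if_neg hr]
      have hout : k ≤ 0 ∨ (solution.length : Int) < k := by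
        rcases not_and_or.mp hr with h | h
        · left; omega
        · right
          simp only [List.length_cons] at h
          push_cast at h
          omega
      rw [no_bracket solution k hout]
      rw [PySem.Str.toList_join, List.map_cons, chars_join_cons]
      simp [List.flatMap_map]

-- ===== VERDICT (by name: the statement is the Claim_ definition above) =====
theorem solution_to_string_spec : Claim_equal_solution_to_string := by
  intro solution k _
  unfold Spec_solution_to_string
  exact key solution k
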